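-- pv_equiv track=rewrite | github.com/Iswara117/belajar_python | python_agustus/alphabet_slice.py | solution
-- ===== SOURCE A (Python) =====
-- def solution(s):
--     string = ''
--     st = ''
--
--     for i in s:
--         if st + i in 'abcdefghijklmnopqrstuvwxyz':
--             st += i
--         else:
--             string += st[::-1]
--             st = i
--
--     return string + st[::-1]
-- ===== SOURCE B (Python) =====
-- def solution(s):
--     n = len(s)
--     starts = []
--     for i in range(n):
--         if i > 0 and 'a' <= s[i-1] <= 'z' and 'a' <= s[i] <= 'z' and ord(s[i]) == ord(s[i-1]) + 1:
--             starts.append(starts[-1])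
--         else:
--             starts.append(i)
--     ends = []
--     for i in range(n - 1, -1, -1):
--         if i + 1 < n and 'a' <= s[i] <= 'z' and 'a' <= s[i+1] <= 'z' and ord(s[i+1]) == ord(s[i]) + 1:
--             ends.append(ends[-1])
--         else:
--             ends.append(i + 1)
--     ends.reverse()
--     return ''.join(s[a + b - 1 - i] for i, (a, b) in enumerate(zip(starts, ends)))
-- ===== Notes on version B (the rewrite author's own statement) =====
-- stated objective: alternative
-- what changed: B computes two per-index boundary arrays - run starts by a forward pass and run ends by a backward pass - and emits each output character directly via the mirror index s[start+end-1-i], using no reversal, slicing or substring accumulation; A grows an accumulator substring tested for membership in the alphabet string and concatenates reversed runs.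
import Mathlib
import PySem

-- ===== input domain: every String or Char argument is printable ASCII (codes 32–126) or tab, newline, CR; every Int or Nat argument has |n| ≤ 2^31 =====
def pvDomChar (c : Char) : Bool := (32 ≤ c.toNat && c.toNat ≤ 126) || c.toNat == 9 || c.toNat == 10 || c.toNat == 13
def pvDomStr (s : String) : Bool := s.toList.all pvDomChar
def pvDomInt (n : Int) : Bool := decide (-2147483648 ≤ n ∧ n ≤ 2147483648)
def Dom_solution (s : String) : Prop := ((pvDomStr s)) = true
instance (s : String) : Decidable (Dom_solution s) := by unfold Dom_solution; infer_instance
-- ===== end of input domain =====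

-- B replaces A's run accumulator (grown char by char and tested for membership in the alphabet
-- string, reversed runs concatenated) by two per-index boundary arrays — run starts from a forward
-- pass, run ends from a backward pass — and emits each output character directly by the mirror
-- index s[start+end-1-i] (objective: alternative construction, same cost).

-- ===== PORT A =====
-- 'st + i in "abc…z"' is PySem.Chars.isIn; st[::-1] is List.reverse (PySem.List.slice?_none_none_neg_one)
def pvAlpha : List Char := "abcdefghijklmnopqrstuvwxyz".toList

def pvStepA (acc : List Char × List Char) (i : Char) : List Char × List Char :=
  if PySem.Chars.isIn (acc.2 ++ [i]) pvAlpha then (acc.1, acc.2 ++ [i])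
  else (acc.1 ++ acc.2.reverse, [i])

def solution (s : String) : String :=
  let r := s.toList.foldl pvStepA ([], [])
  String.ofList (r.1 ++ r.2.reverse)

-- ===== PORT B =====
-- "'a' <= p <= 'z' and 'a' <= c <= 'z' and ord(c) == ord(p) + 1"
def pvCond (p c : Char) : Bool :=
  ('a' ≤ p && p ≤ 'z') && (('a' ≤ c && c ≤ 'z') && (c.toNat == p.toNat + 1))

-- body of the forward loop: starts.append(starts[-1] if i > 0 and adj(s[i-1], s[i]) else i)
-- (starts[-1] is read only when i > 0, so the list is nonempty; pyGetD's default is never used)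
def pvStartStep (cs : List Char) (st : List Int) (i : Int) : List Int :=
  if 0 < i ∧ pvCond (PySem.List.pyGetD cs (i - 1) ' ') (PySem.List.pyGetD cs i ' ') = true
  then st ++ [PySem.List.pyGetD st (-1) 0] else st ++ [i]

def pvStarts (cs : List Char) : List Int :=
  (PySem.List.pyRange 0 (cs.length : Int) 1).foldl (pvStartStep cs) []

-- body of the backward loop: ends.append(ends[-1] if i + 1 < n and adj(s[i], s[i+1]) else i + 1)
def pvEndStep (cs : List Char) (en : List Int) (i : Int) : List Int :=
  if i + 1 < (cs.length : Int) ∧ pvCond (PySem.List.pyGetD cs i ' ') (PySem.List.pyGetD cs (i + 1) ' ') = true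
  then en ++ [PySem.List.pyGetD en (-1) 0] else en ++ [i + 1]

def pvEnds (cs : List Char) : List Int :=
  ((PySem.List.pyRange ((cs.length : Int) - 1) (-1) (-1)).foldl (pvEndStep cs) []).reverse

-- ''.join(s[a + b - 1 - i] for i, (a, b) in enumerate(zip(starts, ends)));
-- a ≤ i < b always holds, so the index a+b-1-i is in range and pyGetD's default is never used
def solution_alt (s : String) : String :=
  String.ofList ((PySem.List.enumerate ((pvStarts s.toList).zip (pvEnds s.toList)) 0).map
    (fun q => PySem.List.pyGetD s.toList (q.2.1 + q.2.2 - 1 - q.1) ' '))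

-- ===== PRECONDITION & SPEC =====
def Spec_solution (s : String) (out : String) : Prop := out = solution_alt s
instance (s : String) (out : String) : Decidable (Spec_solution s out) := by unfold Spec_solution; infer_instance

-- ===== CLAIM (what is proved, stated in full; the proofs are below) =====
def Claim_equal_solution : Prop := ∀ (s : String), Dom_solution s → Spec_solution s (solution s)

-- ===== LEMMAS AND PROOFS =====

-- common reference function: process the rest of the input with current run 'pending'
-- (always nonempty, last char p)
def pvRunCont (pending : List Char) (p : Char) : List Char → List Char
  | [] => pending.reverse
  | c :: rest =>
    if pvCond p c then pvRunCont (pending ++ [c]) c rest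
    else pending.reverse ++ pvRunCont [c] c rest

def pvSpec : List Char → List Char
  | [] => []
  | c :: rest => pvRunCont [c] c rest

lemma pvAlpha_len : pvAlpha.length = 26 := by decide

lemma pvAlpha_getD : ∀ k, k < 26 → (pvAlpha.getD k 'a').toNat = 97 + k := by decide

lemma pvAlpha_get (k : Nat) (hk : k < pvAlpha.length) : (pvAlpha[k]).toNat = 97 + k := by
  have h := pvAlpha_getD k (by rwa [pvAlpha_len] at hk)
  rwa [List.getD_eq_getElem _ _ hk] at h

lemma pvChar_eq {x y : Char} (h : x.toNat = y.toNat) : x = y :=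
  Char.ext (UInt32.toNat_inj.mp h)

-- a nonempty list is a contiguous substring of the alphabet iff its chars are the
-- consecutive codes h, h+1, … within 97..122
lemma pvInfix_iff (h : Char) (t : List Char) :
    (h :: t) <:+: pvAlpha ↔
    (97 ≤ h.toNat ∧ h.toNat + t.length + 1 ≤ 123 ∧
     ∀ k (hk : k < (h :: t).length), ((h :: t)[k]).toNat = h.toNat + k) := by
  constructor
  · rintro ⟨u, v, huv⟩
    have hlen : u.length + (t.length + 1) + v.length = 26 := by
      have := congrArg List.length huv
      simpa [pvAlpha_len, Nat.add_assoc, Nat.add_comm, Nat.add_left_comm] using this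
    have hidx : ∀ k (hk : k < (h :: t).length), ((h :: t)[k]).toNat = 97 + u.length + k := by
      intro k hk
      have hk' : k < t.length + 1 := by simpa using hk
      have hlt : u.length + k < (u ++ (h :: t) ++ v).length := by simp; omega
      have e1 : (u ++ (h :: t) ++ v)[u.length + k]'hlt = (h :: t)[k]'hk := by
        rw [List.getElem_append_left (by simp; omega)]
        rw [List.getElem_append_right (by omega)]
        congr 1
        omega
      have e2 : ((u ++ (h :: t) ++ v)[u.length + k]'hlt).toNat = 97 + (u.length + k) := by
        have e := List.getElem_of_eq huv hlt
        have g := pvAlpha_get (u.length + k) (huv ▸ hlt)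
        exact (congrArg Char.toNat e).trans g
      have e4 : ((h :: t)[k]'hk).toNat = 97 + (u.length + k) :=
        (congrArg Char.toNat e1.symm).trans e2
      omega
    have h0 : h.toNat = 97 + u.length := by
      have := hidx 0 (by simp)
      simpa using this
    refine ⟨by omega, by omega, ?_⟩
    intro k hk
    have := hidx k hk
    omega
  · rintro ⟨h97, hbd, hidx⟩
    have hval : h.toNat ≤ 122 := by omega
    set a := h.toNat - 97 with ha
    set m := t.length + 1 with hm
    have ham : a + m ≤ 26 := by omega
    have heq : h :: t = (pvAlpha.drop a).take m := by
      apply List.ext_getElem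
      · simp [pvAlpha_len]
        omega
      · intro k hk1 hk2
        have hak : a + k < pvAlpha.length := by rw [pvAlpha_len]; simp at hk1; omega
        have e1 : ((pvAlpha.drop a).take m)[k]'hk2 = pvAlpha[a + k]'hak := by
          rw [List.getElem_take, List.getElem_drop]
        have e2 := pvAlpha_get (a + k) hak
        have eR : (((pvAlpha.drop a).take m)[k]'hk2).toNat = 97 + (a + k) :=
          (congrArg Char.toNat e1).trans e2
        have e3 := hidx k hk1
        apply pvChar_eq
        omega
    refine ⟨pvAlpha.take a, pvAlpha.drop (a + m), ?_⟩
    rw [heq, List.append_assoc, ← List.drop_drop,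
        List.take_append_drop m (pvAlpha.drop a)]
    exact List.take_append_drop a pvAlpha

lemma pvCond_iff (p c : Char) : pvCond p c = true ↔
    (97 ≤ p.toNat ∧ p.toNat ≤ 122 ∧ 97 ≤ c.toNat ∧ c.toNat ≤ 122 ∧ c.toNat = p.toNat + 1) := by
  simp [pvCond, Char.le_def, UInt32.le_iff_toNat_le]
  omega

-- A's membership test on a reachable state st equals B's adjacency test on st's last char
lemma pvKey (st : List Char) (p c : Char) (hlast : st.getLast? = some p)
    (hst : st <:+: pvAlpha ∨ st = [p]) :
    ((st ++ [c]) <:+: pvAlpha ↔ pvCond p c = true) := by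
  cases st with
  | nil => simp at hlast
  | cons h t =>
    have hp : (h :: t)[t.length]'(by simp) = p := by
      rw [List.getLast?_eq_getElem?] at hlast
      simp at hlast
      simpa using hlast
    have hcons : (h :: t) ++ [c] = h :: (t ++ [c]) := by simp
    have hLst : ∀ k (hk : k < t.length + 1),
        (h :: (t ++ [c]))[k]'(by simp; omega) = (h :: t)[k]'(by simp; omega) := by
      intro k hk
      cases k with
      | zero => rfl
      | succ k =>
        simp only [List.getElem_cons_succ]
        rw [List.getElem_append_left (by omega)]
    have hLc : (h :: (t ++ [c]))[t.length + 1]'(by simp) = c := by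
      simp
    rcases hst with hin | hone
    · have S := (pvInfix_iff h t).mp hin
      have hpn : p.toNat = h.toNat + t.length := by
        have := S.2.2 t.length (by simp)
        rw [hp] at this
        exact this
      rw [hcons, pvInfix_iff, pvCond_iff]
      constructor
      · rintro ⟨h97, hbd, hidx⟩
        have hc1 : c.toNat = h.toNat + (t.length + 1) := by
          have := hidx (t.length + 1) (by simp)
          rw [hLc] at this
          exact this
        simp at hbd
        omega
      · rintro ⟨hq97, hq122, hc97, hc122, hcp⟩
        refine ⟨S.1, by simp; omega, ?_⟩
        intro k hk
        simp at hk
        rcases Nat.lt_or_ge k (t.length + 1) with hk1 | hk1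
        · rw [hLst k hk1]
          have := S.2.2 k (by simpa using hk1)
          exact this
        · have hk2 : k = t.length + 1 := by omega
          subst hk2
          rw [hLc]
          omega
    · rcases List.cons_eq_cons.mp hone with ⟨hhp, rfl⟩
      subst hhp
      rw [hcons, pvInfix_iff, pvCond_iff]
      constructor
      · rintro ⟨h97, hbd, hidx⟩
        have hc1 : c.toNat = h.toNat + 1 := by
          have := hidx 1 (by simp)
          simpa using this
        simp at hbd
        omega
      · rintro ⟨hq97, hq122, hc97, hc122, hcp⟩
        refine ⟨hq97, by simp; omega, ?_⟩
        intro k hk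
        simp at hk
        interval_cases k
        · simp
        · simpa using hcp

-- ===== A-side: the foldl equals pvRunCont =====
lemma pvA_loop (l : List Char) : ∀ (st : List Char) (p : Char) (str : List Char),
    st.getLast? = some p → (st <:+: pvAlpha ∨ st = [p]) →
    (l.foldl pvStepA (str, st)).1 ++ (l.foldl pvStepA (str, st)).2.reverse
      = str ++ pvRunCont st p l := by
  induction l with
  | nil => intro st p str _ _; simp [pvRunCont]
  | cons c rest ih =>
    intro st p str hlast hst
    have hcond : PySem.Chars.isIn (st ++ [c]) pvAlpha = pvCond p c := by
      rw [Bool.eq_iff_iff, PySem.Chars.isIn_iff_infix]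
      exact pvKey st p c hlast hst
    simp only [List.foldl_cons]
    by_cases hc : pvCond p c = true
    · have hstep : pvStepA (str, st) c = (str, st ++ [c]) := by
        simp [pvStepA, hcond, hc]
      have hin : (st ++ [c]) <:+: pvAlpha := (pvKey st p c hlast hst).mpr hc
      rw [hstep, ih (st ++ [c]) c str List.getLast?_concat (Or.inl hin)]
      simp [pvRunCont, hc]
    · have hstep : pvStepA (str, st) c = (str ++ st.reverse, [c]) := by
        simp [pvStepA, hcond, hc]
      rw [hstep, ih [c] c (str ++ st.reverse) rfl (Or.inr rfl)]
      simp [pvRunCont, hc]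

theorem pvA_eq_spec (s : String) : solution s = String.ofList (pvSpec s.toList) := by
  unfold solution
  cases hcs : s.toList with
  | nil => simp [pvSpec]
  | cons c rest =>
    have h1 : pvStepA ([], []) c = ([], [c]) := by
      simp [pvStepA]
    have := pvA_loop rest [c] c [] rfl (Or.inr rfl)
    simp only [List.foldl_cons, h1] at *
    exact congrArg String.ofList (by simpa using this)

-- ===== B-side: functional characterisation of the two boundary arrays =====

-- adjacency between positions i and i+1
def pvAdjIdx (cs : List Char) (i : Nat) : Bool := pvCond (cs.getD i ' ') (cs.getD (i + 1) ' ')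

def pvStartR (cs : List Char) : Nat → Nat
  | 0 => 0
  | i + 1 => if pvAdjIdx cs i then pvStartR cs i else i + 1

def pvEndGo (cs : List Char) : Nat → Nat → Nat
  | 0, i => i + 1
  | k + 1, i => if pvAdjIdx cs i then pvEndGo cs k (i + 1) else i + 1

def pvEndR (cs : List Char) (i : Nat) : Nat := pvEndGo cs (cs.length - i - 1) i

-- length of the adjacency chain continuing p at the head of l
def pvChain : Char → List Char → Nat
  | _, [] => 0
  | p, c :: t => if pvCond p c then pvChain c t + 1 else 0

lemma pvCond_space (p : Char) : pvCond p ' ' = false := by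
  simp [pvCond, show ¬ ('a' ≤ ' ') from by decide]

lemma pvGetD_drop (cs : List Char) (m j : Nat) (d : Char) :
    (cs.drop m).getD j d = cs.getD (m + j) d := by
  simp [List.getD, List.getElem?_drop]

lemma pvAdjIdx_drop (cs : List Char) (m j : Nat) :
    pvAdjIdx cs (m + j) = pvAdjIdx (cs.drop m) j := by
  simp [pvAdjIdx, Nat.add_assoc]

lemma pvEndGo_lb (cs : List Char) : ∀ (k i : Nat), i + 1 ≤ pvEndGo cs k i ∧ pvEndGo cs k i ≤ i + 1 + k := by
  intro k
  induction k with
  | zero => intro i; simp [pvEndGo]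
  | succ k ih =>
    intro i
    simp only [pvEndGo]
    split
    · have := ih (i + 1)
      omega
    · omega

lemma pvEndR_lb (cs : List Char) (i : Nat) :
    i + 1 ≤ pvEndR cs i ∧ pvEndR cs i ≤ max cs.length (i + 1) := by
  have := pvEndGo_lb cs (cs.length - i - 1) i
  unfold pvEndR
  omega

-- recurrence satisfied by pvEndR (any i)
lemma pvEndR_rec (cs : List Char) (i : Nat) :
    pvEndR cs i = if i + 1 < cs.length ∧ pvAdjIdx cs i then pvEndR cs (i + 1) else i + 1 := by
  unfold pvEndR
  by_cases h : i + 1 < cs.length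
  · have hf : cs.length - i - 1 = (cs.length - (i + 1) - 1) + 1 := by omega
    rw [hf]
    simp only [pvEndGo]
    by_cases ha : pvAdjIdx cs i
    · simp [ha, h]
    · simp [ha, h]
  · have hf : cs.length - i - 1 = 0 := by omega
    rw [hf]
    simp [pvEndGo, h]

-- pvEndR is constant along a run
lemma pvEndR_const (cs : List Char) : ∀ (d i j : Nat), j - i = d → i ≤ j → j < pvEndR cs i →
    pvEndR cs j = pvEndR cs i := by
  intro d
  induction d with
  | zero =>
    intro i j hd hij _
    have hji : i = j := by omega
    rw [hji]
  | succ d ih =>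
    intro i j hd hij hlt
    have hij' : i < j := by omega
    have hstep : pvEndR cs i = pvEndR cs (i + 1) ∧ (i + 1 < cs.length ∧ pvAdjIdx cs i) := by
      rw [pvEndR_rec cs i] at hlt ⊢
      split at hlt
      · rename_i hc; exact ⟨by rw [if_pos hc], hc⟩
      · omega
    rw [hstep.1]
    exact ih (i + 1) j (by omega) (by omega) (by rw [← hstep.1]; exact hlt)

-- pvStartR is constant along a run
lemma pvStartR_const (cs : List Char) : ∀ (d i j : Nat), j - i = d → i ≤ j → j < pvEndR cs i →
    pvStartR cs j = pvStartR cs i := by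
  intro d
  induction d with
  | zero =>
    intro i j hd hij _
    have hji : i = j := by omega
    rw [hji]
  | succ d ih =>
    intro i j hd hij hlt
    have hij' : i < j := by omega
    have hcond : i + 1 < cs.length ∧ pvAdjIdx cs i := by
      rw [pvEndR_rec cs i] at hlt
      split at hlt
      · assumption
      · omega
    have hEq : pvEndR cs (i + 1) = pvEndR cs i := by
      rw [pvEndR_rec cs i, if_pos hcond]
    have hs : pvStartR cs (i + 1) = pvStartR cs i := by
      simp [pvStartR, hcond.2]
    rw [← hs]
    exact ih (i + 1) j (by omega) (by omega) (by rw [hEq]; exact hlt)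

-- the first run boundary: adjacency fails (or the string ends) at pvEndR cs 0
lemma pvAdjIdx_at_end (cs : List Char) (h : cs ≠ []) :
    pvAdjIdx cs (pvEndR cs 0 - 1) = false := by
  have hn : 0 < cs.length := List.length_pos_iff.mpr h
  set m := pvEndR cs 0 with hm
  have hlb := pvEndR_lb cs 0
  by_cases hmn : m < cs.length
  · -- m < n : pvEndGo stopped early, F2b-style argument via pvEndR_rec at m-1
    -- walk: pvEndR (m-1) = m (const), then its recurrence forces the adjacency test false
    have h1 : pvEndR cs (m - 1) = m := by
      have := pvEndR_const cs (m - 1) 0 (m - 1) (by omega) (by omega) (by omega)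
      rw [this]
    rw [pvEndR_rec cs (m - 1)] at h1
    split at h1
    · rename_i hc
      exfalso
      have := pvEndR_lb cs (m - 1 + 1)
      omega
    · rename_i hc
      have hml : m - 1 + 1 = m := by omega
      rw [hml] at hc
      by_cases ha : pvAdjIdx cs (m - 1)
      · exact absurd ⟨hmn, ha⟩ hc
      · simpa using ha
  · -- m = n : cs.getD m ' ' = ' ', and pvCond _ ' ' = false
    have hmeq : m = cs.length := by omega
    have : cs.getD (m - 1 + 1) ' ' = ' ' := by
      apply List.getD_eq_default
      omega
    unfold pvAdjIdx
    rw [this, pvCond_space]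

-- shift lemmas past the first run
lemma pvStartR_shift (cs : List Char) (m : Nat) (hm : m = pvEndR cs 0) (h : cs ≠ []) :
    ∀ j, pvStartR cs (m + j) = m + pvStartR (cs.drop m) j := by
  have hm1 : 1 ≤ m := by have := pvEndR_lb cs 0; omega
  intro j
  induction j with
  | zero =>
    have hb : pvAdjIdx cs (m - 1) = false := hm ▸ pvAdjIdx_at_end cs h
    have hms : m = (m - 1) + 1 := by omega
    rw [Nat.add_zero, hms]
    simp [pvStartR, hb]
  | succ j ih =>
    have hsucc : m + (j + 1) = (m + j) + 1 := by omega
    rw [hsucc]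
    simp only [pvStartR, pvAdjIdx_drop cs m j]
    split
    · rw [ih]
    · omega

lemma pvEndGo_shift (cs : List Char) (m : Nat) : ∀ (k j : Nat),
    pvEndGo cs k (m + j) = m + pvEndGo (cs.drop m) k j := by
  intro k
  induction k with
  | zero => intro j; simp [pvEndGo]; omega
  | succ k ih =>
    intro j
    simp only [pvEndGo, pvAdjIdx_drop cs m j]
    split
    · rw [show m + j + 1 = m + (j + 1) from by omega, ih (j + 1)]
    · omega

lemma pvEndR_shift (cs : List Char) (m j : Nat) :
    pvEndR cs (m + j) = m + pvEndR (cs.drop m) j := by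
  unfold pvEndR
  rw [pvEndGo_shift cs m _ j, List.length_drop]
  congr 2
  omega

-- ===== connecting pvEndR's first value to the run decomposition of pvSpec =====
lemma pvEndGo_chain (cs : List Char) : ∀ (k i : Nat), i + 1 + k = cs.length →
    pvEndGo cs k i = i + 1 + pvChain (cs.getD i ' ') (cs.drop (i + 1)) := by
  intro k
  induction k with
  | zero =>
    intro i h
    have hi : i + 1 = cs.length := by omega
    rw [hi, List.drop_length]
    simp [pvEndGo, pvChain]
    omega
  | succ k ih =>
    intro i h
    have hi1 : i + 1 < cs.length := by omega
    have hdrop : cs.drop (i + 1) = cs[i + 1] :: cs.drop (i + 1 + 1) := (List.getElem_cons_drop hi1).symm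
    have hget : cs.getD (i + 1) ' ' = cs[i + 1] := List.getD_eq_getElem cs ' ' hi1
    simp only [pvEndGo, pvAdjIdx, hget, hdrop, pvChain]
    by_cases hc : pvCond (cs.getD i ' ') cs[i + 1] = true
    · rw [if_pos hc, if_pos hc, ih (i + 1) (by omega)]
      rw [hget]
      omega
    · rw [if_neg hc, if_neg hc]

lemma pvRunCont_chain : ∀ (l : List Char) (pending : List Char) (p : Char),
    pvRunCont pending p l
      = (pending ++ l.take (pvChain p l)).reverse ++ pvSpec (l.drop (pvChain p l)) := by
  intro l
  induction l with
  | nil => intro pending p; simp [pvRunCont, pvChain, pvSpec]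
  | cons c t ih =>
    intro pending p
    simp only [pvRunCont, pvChain]
    by_cases hc : pvCond p c = true
    · rw [if_pos hc, if_pos hc, ih (pending ++ [c]) c]
      simp
    · rw [if_neg hc, if_neg hc]
      simp [pvSpec]

lemma pvSpec_split (cs : List Char) (h : cs ≠ []) :
    pvSpec cs = (cs.take (pvEndR cs 0)).reverse ++ pvSpec (cs.drop (pvEndR cs 0)) := by
  cases cs with
  | nil => exact absurd rfl h
  | cons c rest =>
    have hch : pvEndR (c :: rest) 0 = 1 + pvChain c rest := by
      unfold pvEndR
      have := pvEndGo_chain (c :: rest) ((c :: rest).length - 0 - 1) 0 (by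
        simp only [List.length_cons]; omega)
      simpa using this
    rw [show pvSpec (c :: rest) = pvRunCont [c] c rest from rfl,
        pvRunCont_chain rest [c] c, hch]
    simp [List.take_succ_cons, List.drop_succ_cons,
      show ∀ k, 1 + k = k + 1 from fun k => by omega]

-- ===== the mirror-index output equals pvSpec =====
def pvOutSpec (cs : List Char) : List Char :=
  (List.range cs.length).map (fun i => cs.getD (pvStartR cs i + pvEndR cs i - 1 - i) ' ')

lemma pvOutSpec_eq : ∀ (n : Nat) (cs : List Char), cs.length = n → pvOutSpec cs = pvSpec cs := by
  intro n
  induction n using Nat.strong_induction_on with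
  | _ n ih =>
    intro cs hn
    cases hcs : cs with
    | nil => simp [pvOutSpec, pvSpec]
    | cons c rest =>
      subst hcs
      have hne : (c :: rest) ≠ [] := by simp
      set cs := c :: rest
      set m := pvEndR cs 0 with hm
      have hlb := pvEndR_lb cs 0
      have hm1 : 1 ≤ m := by omega
      have hmn : m ≤ cs.length := by
        have h1 : 0 < cs.length := List.length_pos_iff.mpr hne
        omega
      set t := cs.drop m with ht
      have hsplit : cs.length = m + (cs.length - m) := by omega
      have htlen : t.length = cs.length - m := by simp [ht]
      unfold pvOutSpec
      rw [show cs.length = m + (cs.length - m) from hsplit, List.range_add, List.map_append,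
        List.map_map]
      have hfirst : (List.range m).map (fun i => cs.getD (pvStartR cs i + pvEndR cs i - 1 - i) ' ')
          = (cs.take m).reverse := by
        apply List.ext_getElem
        · simp; omega
        · intro j hj1 hj2
          have hjm : j < m := by simpa using hj1
          have hs0 : pvStartR cs j = 0 := by
            have := pvStartR_const cs j 0 j (by omega) (by omega) (by omega)
            simpa [pvStartR] using this
          have he0 : pvEndR cs j = m := by
            have := pvEndR_const cs j 0 j (by omega) (by omega) (by omega)
            rw [this]
          simp only [List.getElem_map, List.getElem_range, hs0, he0, List.getElem_reverse,
            List.getElem_take]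
          rw [List.getD_eq_getElem cs ' ' (by omega)]
          congr 1
          simp
          omega
      have hsecond : (List.range (cs.length - m)).map
            ((fun i => cs.getD (pvStartR cs i + pvEndR cs i - 1 - i) ' ') ∘ (fun k => m + k))
          = pvOutSpec t := by
        unfold pvOutSpec
        rw [htlen]
        apply List.map_congr_left
        intro j hj
        have hjlt : j < cs.length - m := List.mem_range.mp hj
        have hS := pvStartR_shift cs m hm hne j
        have hE := pvEndR_shift cs m j
        have htlb := pvEndR_lb t j
        simp only [Function.comp_apply, hS, hE]
        rw [show m + pvStartR t j + (m + pvEndR t j) - 1 - (m + j)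
              = m + (pvStartR t j + pvEndR t j - 1 - j) from by omega]
        rw [← pvGetD_drop cs m _ ' ']
      rw [hfirst, hsecond, ih (cs.length - m) (by omega) t htlen,
        pvSpec_split cs hne, ← hm, ← ht]

-- ===== the imperative loops compute the functional arrays =====
lemma pvStarts_loop (cs : List Char) : ∀ (k i : Nat), i + k = cs.length →
    (PySem.List.pyRange (i : Int) (cs.length : Int) 1).foldl (pvStartStep cs)
        ((List.range i).map (fun j => (pvStartR cs j : Int)))
      = (List.range cs.length).map (fun j => (pvStartR cs j : Int)) := by
  intro k
  induction k with
  | zero =>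
    intro i h
    rw [show i = cs.length from by omega, PySem.List.pyRange_one_eq_nil (by omega)]
    simp
  | succ k ih =>
    intro i h
    have hi : i < cs.length := by omega
    rw [PySem.List.pyRange_one_cons (by exact_mod_cast hi), List.foldl_cons]
    have hstep : pvStartStep cs ((List.range i).map (fun j => (pvStartR cs j : Int))) (i : Int)
        = (List.range (i + 1)).map (fun j => (pvStartR cs j : Int)) := by
      unfold pvStartStep
      rw [List.range_succ, List.map_append]
      cases i with
      | zero =>
        rw [if_neg (by simp)]
        simp [pvStartR]
      | succ i' =>
        have hg1 : PySem.List.pyGetD cs ((((i' + 1 : Nat)) : Int) - 1) ' ' = cs.getD i' ' ' := by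
          rw [show (((i' + 1 : Nat)) : Int) - 1 = ((i' : Nat) : Int) from by push_cast; omega,
            PySem.List.pyGetD_natCast]
        have hg2 : PySem.List.pyGetD cs (((i' + 1 : Nat)) : Int) ' ' = cs.getD (i' + 1) ' ' := by
          rw [PySem.List.pyGetD_natCast]
        have hne : (List.range (i' + 1)).map (fun j => (pvStartR cs j : Int)) ≠ [] := by
          simp
        have hlast : PySem.List.pyGetD
            ((List.range (i' + 1)).map (fun j => (pvStartR cs j : Int))) (-1) 0
            = (pvStartR cs i' : Int) := by
          rw [show (List.range (i' + 1)).map (fun j => (pvStartR cs j : Int))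
              = (List.range i').map (fun j => (pvStartR cs j : Int)) ++ [(pvStartR cs i' : Int)]
              from by rw [List.range_succ, List.map_append]; simp]
          exact PySem.List.pyGetD_neg_one_append_singleton _ _ _
        by_cases hc : pvAdjIdx cs i' = true
        · rw [if_pos ⟨by positivity, by rw [hg1, hg2]; exact hc⟩, hlast]
          simp [pvStartR, hc]
        · rw [if_neg (by rw [hg1, hg2]; simp [pvAdjIdx] at hc; simp [hc]
              )]
          simp [pvStartR, hc]
    rw [hstep, show ((i : Int) + 1) = (((i + 1 : Nat)) : Int) from by push_cast; ring]
    exact ih (i + 1) (by omega)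

lemma pvStarts_eq (cs : List Char) :
    pvStarts cs = (List.range cs.length).map (fun j => (pvStartR cs j : Int)) := by
  have := pvStarts_loop cs cs.length 0 (by omega)
  simpa [pvStarts] using this

-- appended value of the backward loop at index i
lemma pvEndStep_val (cs : List Char) (i : Nat) (en : List Int)
    (hlast : i + 1 < cs.length → PySem.List.pyGetD en (-1) 0 = (pvEndR cs (i + 1) : Int)) :
    pvEndStep cs en (i : Int) = en ++ [(pvEndR cs i : Int)] := by
  unfold pvEndStep
  have hg1 : PySem.List.pyGetD cs ((i : Nat) : Int) ' ' = cs.getD i ' ' :=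
    PySem.List.pyGetD_natCast cs i ' '
  have hg2 : PySem.List.pyGetD cs (((i : Nat) : Int) + 1) ' ' = cs.getD (i + 1) ' ' := by
    rw [show ((i : Nat) : Int) + 1 = (((i + 1 : Nat)) : Int) from by push_cast; ring,
      PySem.List.pyGetD_natCast]
  by_cases hc : i + 1 < cs.length ∧ pvAdjIdx cs i = true
  · rw [if_pos ⟨by exact_mod_cast hc.1, by rw [hg1, hg2]; exact hc.2⟩, hlast hc.1]
    rw [pvEndR_rec cs i, if_pos hc]
  · rw [if_neg (by
        rintro ⟨h1, h2⟩
        exact hc ⟨by exact_mod_cast h1, by rw [hg1, hg2] at h2; exact h2⟩)]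
    rw [pvEndR_rec cs i, if_neg hc]
    push_cast
    ring_nf

lemma pvEnds_loop (cs : List Char) : ∀ (i : Nat), i < cs.length →
    ∀ (en : List Int), (i + 1 < cs.length → PySem.List.pyGetD en (-1) 0 = (pvEndR cs (i + 1) : Int)) →
    (PySem.List.pyRange (i : Int) (-1) (-1)).foldl (pvEndStep cs) en
      = en ++ (List.range (i + 1)).map (fun j => (pvEndR cs (i - j) : Int)) := by
  intro i
  induction i with
  | zero =>
    intro h0 en hlast
    rw [PySem.List.pyRange_neg_one_cons (by omega), PySem.List.pyRange_neg_one_eq_nil (by omega)]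
    rw [List.foldl_cons, List.foldl_nil, pvEndStep_val cs 0 en hlast]
    simp
  | succ i ih =>
    intro h0 en hlast
    rw [PySem.List.pyRange_neg_one_cons (by omega), List.foldl_cons]
    rw [show ((i + 1 : Nat) : Int) - 1 = ((i : Nat) : Int) from by push_cast; ring]
    rw [pvEndStep_val cs (i + 1) en hlast]
    rw [ih (by omega) (en ++ [(pvEndR cs (i + 1) : Int)])
      (fun _ => PySem.List.pyGetD_neg_one_append_singleton _ _ _)]
    rw [List.append_assoc]
    congr 1
    apply List.ext_getElem
    · simp
    · intro j hj1 hj2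
      cases j with
      | zero => simp
      | succ j' =>
        have hj' : j' < i + 1 := by simpa using hj1
        simp only [List.singleton_append, List.getElem_cons_succ, List.getElem_map,
          List.getElem_range]
        congr 2
        omega

lemma pvEnds_eq (cs : List Char) :
    pvEnds cs = (List.range cs.length).map (fun j => (pvEndR cs j : Int)) := by
  unfold pvEnds
  cases hcs : cs with
  | nil =>
    rw [PySem.List.pyRange_neg_one_eq_nil (by simp)]
    simp
  | cons c rest =>
    set n := (c :: rest).length with hn
    have hn1 : 1 ≤ n := by simp [hn]
    rw [show (n : Int) - 1 = (((n - 1 : Nat)) : Int) from by omega]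
    rw [pvEnds_loop (c :: rest) (n - 1) (by omega) [] (fun h => absurd h (by omega))]
    rw [List.nil_append, show n - 1 + 1 = n from by omega]
    apply List.ext_getElem
    · simp
    · intro j hj1 hj2
      have hjn : j < n := by simpa using hj2
      rw [List.getElem_reverse]
      simp only [List.getElem_map, List.getElem_range, List.length_map, List.length_range]
      congr 2
      omega

-- enumerate over a map of range, with Int indices
lemma pvEnumerate_map_range {α : Type} (n : Nat) (h : Nat → α) :
    PySem.List.enumerate ((List.range n).map h) 0
      = (List.range n).map (fun i : Nat => ((i : Int), h i)) := by
  apply List.ext_getElem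
  · simp [PySem.List.length_enumerate]
  · intro k hk1 hk2
    have hkn : k < n := by simpa using hk2
    rw [PySem.List.getElem_enumerate]
    simp

theorem pvB_eq_spec (s : String) : solution_alt s = String.ofList (pvSpec s.toList) := by
  unfold solution_alt
  set cs := s.toList with hcs
  rw [pvStarts_eq, pvEnds_eq, List.zip_map', pvEnumerate_map_range, List.map_map]
  rw [← pvOutSpec_eq cs.length cs rfl]
  unfold pvOutSpec
  congr 1
  apply List.map_congr_left
  intro i hi
  have hin : i < cs.length := List.mem_range.mp hi
  have hlb := pvEndR_lb cs i
  simp only [Function.comp_apply]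
  rw [show ((pvStartR cs i : Int)) + (pvEndR cs i : Int) - 1 - (i : Int)
      = (((pvStartR cs i + pvEndR cs i - 1 - i : Nat)) : Int) from by omega]
  rw [PySem.List.pyGetD_natCast]

-- ===== VERDICT (by name: the statement is the Claim_ definition above) =====
theorem solution_spec : Claim_equal_solution := by
  intro s _
  unfold Spec_solution
  rw [pvA_eq_spec, pvB_eq_spec]
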